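-- pv_equiv track=rewrite | github.com/shatianming5/Aider_runner | tools/aider_runbook.py | parse_last_rc
-- ===== SOURCE A (Python) =====
-- SENTINEL = "__AIDER_FSM_RC:"
--
-- def parse_last_rc(text: str) -> int | None:
--     rc: int | None = None
--     for line in text.splitlines():
--         s = line.strip()
--         if not s.startswith(SENTINEL):
--             continue
--         tail = s[len(SENTINEL) :].strip()
--         try:
--             rc = int(tail)
--         except Exception:
--             continue
--     return rc
-- ===== SOURCE B (Python) =====
-- SENTINEL = "__AIDER_FSM_RC:"
--
-- def _line_rc(line):
--     s = line.strip()
--     if not s.startswith(SENTINEL):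
--         return None
--     try:
--         return int(s[len(SENTINEL):].strip())
--     except Exception:
--         return None
--
-- def parse_last_rc(text):
--     for line in reversed(text.splitlines()):
--         v = _line_rc(line)
--         if v is not None:
--             return v
--     return None
-- ===== Notes on version B (the rewrite author's own statement) =====
-- stated objective: alternative
-- what changed: Replaces the forward whole-text pass that keeps overwriting the last parsed code with a backward early-exit search over reversed(splitlines()) that returns the first parsable sentinel line from the end.
import Mathlib
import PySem

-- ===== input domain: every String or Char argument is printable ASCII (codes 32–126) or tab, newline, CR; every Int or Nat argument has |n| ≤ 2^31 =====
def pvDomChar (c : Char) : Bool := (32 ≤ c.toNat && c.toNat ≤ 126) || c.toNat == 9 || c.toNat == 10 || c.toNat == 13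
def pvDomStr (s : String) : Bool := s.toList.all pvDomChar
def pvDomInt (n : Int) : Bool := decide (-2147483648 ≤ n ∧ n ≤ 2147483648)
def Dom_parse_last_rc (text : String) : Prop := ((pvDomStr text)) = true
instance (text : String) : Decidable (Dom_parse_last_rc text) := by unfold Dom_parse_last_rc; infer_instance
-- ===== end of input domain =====

-- B replaces A's forward pass (keep overwriting the last parsed code) with a backward
-- early-exit search over the reversed line list; alternative decomposition, same result.


-- shared per-line code (identical in both Pythons): strip, check the sentinel prefix,
-- strip the tail after the 15-char sentinel, int(tail) (none = ValueError / no sentinel)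
def pvLineRC (line : String) : Option Int :=
  let s := PySem.Str.strip line
  if PySem.Str.startswith s "__AIDER_FSM_RC:" then
    PySem.Int.ofStr? (PySem.Str.strip (PySem.Str.slice s (some 15) none))
  else none

-- ===== PORT A =====
-- forward fold over splitlines, rc overwritten by each successfully parsed sentinel line
def parse_last_rc (text : String) : Option Int :=
  (PySem.Str.splitlines text).foldl
    (fun rc line =>
      match pvLineRC line with
      | some v => some v
      | none => rc)
    none

-- ===== PORT B =====
-- backward search: first line (from the end) whose pvLineRC succeeds
def pvFindRC : List String → Option Int
  | [] => none
  | l :: rest =>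
    match pvLineRC l with
    | some v => some v
    | none => pvFindRC rest

def parse_last_rc_alt (text : String) : Option Int :=
  pvFindRC (PySem.Str.splitlines text).reverse

-- ===== PRECONDITION & SPEC =====
def Spec_parse_last_rc (text : String) (out : Option Int) : Prop := out = parse_last_rc_alt text
instance (text : String) (out : Option Int) : Decidable (Spec_parse_last_rc text out) := by unfold Spec_parse_last_rc; infer_instance

-- ===== CLAIM (what is proved, stated in full; the proofs are below) =====
def Claim_equal_parse_last_rc : Prop := ∀ (text : String), Dom_parse_last_rc text → Spec_parse_last_rc text (parse_last_rc text)

-- ===== LEMMAS AND PROOFS =====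

theorem pvFindRC_append (a b : List String) :
    pvFindRC (a ++ b) =
      match pvFindRC a with
      | some v => some v
      | none => pvFindRC b := by
  induction a with
  | nil => simp [pvFindRC]
  | cons x xs ih =>
    simp only [List.cons_append, pvFindRC, ih]
    cases pvLineRC x <;> simp

theorem foldl_eq_findRC_rev (xs : List String) (init : Option Int) :
    xs.foldl
      (fun rc line =>
        match pvLineRC line with
        | some v => some v
        | none => rc)
      init =
      match pvFindRC xs.reverse with
      | some v => some v
      | none => init := by
  induction xs generalizing init with
  | nil => simp [pvFindRC]
  | cons x xs ih =>
    simp only [List.foldl_cons, List.reverse_cons, pvFindRC_append, ih, pvFindRC]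
    cases pvFindRC xs.reverse <;> cases pvLineRC x <;> simp

-- ===== VERDICT (by name: the statement is the Claim_ definition above) =====
theorem parse_last_rc_spec : Claim_equal_parse_last_rc := by
  intro text _
  unfold Spec_parse_last_rc parse_last_rc parse_last_rc_alt
  rw [foldl_eq_findRC_rev]
  cases pvFindRC (PySem.Str.splitlines text).reverse <;> simp
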